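-- pv_equiv track=rewrite | github.com/rudaamaro/pdfata | app.py | extract_table_items
-- ===== SOURCE A (Python) =====
-- from typing import Dict, Iterable, List, Optional, Sequence, Tuple
--
-- def normalize_text(value: Optional[str]) -> str:
--     return (value or "").strip()
--
-- def extract_table_items(table: Sequence[Sequence[str]], header_idx: int, mapping: Dict[str, int]) -> List[Dict[str, str]]:
--     items: List[Dict[str, str]] = []
--     current: Optional[Dict[str, str]] = None
--
--     for raw_row in table[header_idx + 1 :]:
--         row = [normalize_text(cell) for cell in raw_row]
--         if not any(row):
--             current = None
--             continue
--
--         def get(col_key: str) -> str: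
--             col = mapping.get(col_key)
--             if col is None:
--                 return ""
--             return row[col] if col < len(row) else ""
--
--         item_code = get("item")
--         desc_text = get("description")
--
--         if item_code:
--             current = {
--                 "item": item_code,
--                 "description": desc_text,
--                 "quantity": get("quantity"),
--                 "unit_value": get("unit_value"),
--                 "total_value": get("total_value"),
--             }
--             if any(current.values()):
--                 items.append(current)
--         elif current and desc_text:
--             # Linhas adicionais para a descrição
--             current["description"] = (current["description"] + "\n" + desc_text).strip()
--             if mapping.get("quantity") is not None and get("quantity"):
--                 current["quantity"] = get("quantity") or current["quantity"]
--             if mapping.get("unit_value") is not None and get("unit_value"):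
--                 current["unit_value"] = get("unit_value") or current["unit_value"]
--             if mapping.get("total_value") is not None and get("total_value"):
--                 current["total_value"] = get("total_value") or current["total_value"]
--
--     return items
-- ===== SOURCE B (Python) =====
-- from typing import Dict, List, Optional, Sequence, Tuple
--
--
-- def _cell(row: Sequence[str], mapping: Dict[str, int], key: str) -> str:
--     col = mapping.get(key)
--     if col is None:
--         return ""
--     return row[col] if col < len(row) else ""
--
--
-- def extract_table_items(table: Sequence[Sequence[str]], header_idx: int, mapping: Dict[str, int]) -> List[Dict[str, str]]:
--     rows = [[(c or "").strip() for c in raw] for raw in table[header_idx + 1 :]]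
--
--     # Phase 1: partition the rows into blocks (head item row, continuation rows).
--     blocks: List[Tuple[List[str], List[List[str]]]] = []
--     i, n = 0, len(rows)
--     while i < n:
--         row = rows[i]
--         if not any(row) or not _cell(row, mapping, "item"):
--             i += 1
--             continue
--         conts: List[List[str]] = []
--         j = i + 1
--         while j < n:
--             nxt = rows[j]
--             if not any(nxt) or _cell(nxt, mapping, "item"):
--                 break
--             if _cell(nxt, mapping, "description"):
--                 conts.append(nxt)
--             j += 1
--         blocks.append((row, conts))
--         i = j
--
--     # Phase 2: build one item dict per block.
--     items: List[Dict[str, str]] = []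
--     for head, conts in blocks:
--         item = {
--             "item": _cell(head, mapping, "item"),
--             "description": _cell(head, mapping, "description"),
--             "quantity": _cell(head, mapping, "quantity"),
--             "unit_value": _cell(head, mapping, "unit_value"),
--             "total_value": _cell(head, mapping, "total_value"),
--         }
--         for row in conts:
--             item["description"] = (item["description"] + "\n" + _cell(row, mapping, "description")).strip()
--             for key in ("quantity", "unit_value", "total_value"):
--                 v = _cell(row, mapping, key)
--                 if v:
--                     item[key] = v
--         items.append(item)
--     return items
-- ===== Notes on version B (the rewrite author's own statement) =====
-- stated objective: alternative
-- what changed: A is a single pass with a mutable 'current' dict aliasing the last appended item; B first partitions the rows after the header into (item row, continuation rows) blocks and then builds each item dict independently per block.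
-- outside the precondition, e.g. on extract_table_items([['d']], -1, {'description': 0, 'quantity': -5}): A returns [], B returns []
import Mathlib
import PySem

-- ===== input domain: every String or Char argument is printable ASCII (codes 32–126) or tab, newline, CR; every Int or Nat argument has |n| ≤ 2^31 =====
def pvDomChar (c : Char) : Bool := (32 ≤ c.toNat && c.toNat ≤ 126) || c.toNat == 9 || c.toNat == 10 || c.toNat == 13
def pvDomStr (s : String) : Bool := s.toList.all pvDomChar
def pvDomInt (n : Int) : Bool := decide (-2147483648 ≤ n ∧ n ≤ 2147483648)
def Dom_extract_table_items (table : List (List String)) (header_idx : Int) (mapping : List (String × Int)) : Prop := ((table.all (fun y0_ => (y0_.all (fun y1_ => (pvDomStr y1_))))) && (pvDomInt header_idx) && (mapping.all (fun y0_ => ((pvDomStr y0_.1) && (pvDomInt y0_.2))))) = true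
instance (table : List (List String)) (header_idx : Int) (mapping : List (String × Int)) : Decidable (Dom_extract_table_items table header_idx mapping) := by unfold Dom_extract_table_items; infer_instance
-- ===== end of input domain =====

-- B re-decomposes A's one-pass mutable state machine into two phases (partition the rows into
-- item blocks, then build one item dict per block); equivalence is about the return value only
-- (neither program mutates its arguments).

-- shared decoding of the Python data used verbatim by both sources:
-- normalize_text over a row, and `any(row)`
def pvNorm (raw : List String) : List String := raw.map (fun c => PySem.Str.strip c)
def pvTruthy (row : List String) : Bool := row.any (fun c => c != "")
-- mapping.get(key) — first-match lookup on the insertion-ordered association list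
def pvColOf (mapping : List (String × Int)) (key : String) : Option Int :=
  (PySem.Dict.mk mapping).get? key
-- `row[col] if col < len(row) else ""` (negative col: Python wraparound via pyGetD; exact under Pre_)
def pvCell (mapping : List (String × Int)) (row : List String) (key : String) : String :=
  match pvColOf mapping key with
  | none => ""
  | some col => if col < (row.length : Int) then PySem.List.pyGetD row col "" else ""

-- ===== PORT A =====
-- the item dict: an assoc list with the five keys in insertion order; assignment overwrites in place
def pvSetKey (item : List (String × String)) (k v : String) : List (String × String) :=
  item.map (fun p => if p.1 == k then (k, v) else p)
def pvReadKey (item : List (String × String)) (k : String) : String :=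
  (((item.find? (fun p => p.1 == k)).map (fun p => p.2)).getD "")
-- mutating `items[-1]` through the alias `current` (current, when not None, is always the
-- last appended item, since an item row always appends): modeled as updating the last element
def pvUpdLast (xs : List (List (String × String))) (f : List (String × String) → List (String × String)) :
    List (List (String × String)) :=
  match xs with
  | [] => []
  | [x] => [f x]
  | x :: rest => x :: pvUpdLast rest f
-- the loop body of A; state = (items, current-is-not-None)
def pvStepA (mapping : List (String × Int)) (st : List (List (String × String)) × Bool)
    (raw_row : List String) : List (List (String × String)) × Bool :=
  let row := pvNorm raw_row
  if ¬ pvTruthy row then (st.1, false)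
  else
    let item_code := pvCell mapping row "item"
    let desc_text := pvCell mapping row "description"
    if item_code ≠ "" then
      let current : List (String × String) :=
        [("item", item_code), ("description", desc_text),
         ("quantity", pvCell mapping row "quantity"),
         ("unit_value", pvCell mapping row "unit_value"),
         ("total_value", pvCell mapping row "total_value")]
      (if current.any (fun p => p.2 != "") then st.1 ++ [current] else st.1, true)
    else if st.2 ∧ desc_text ≠ "" then
      (pvUpdLast st.1 (fun cur =>
        let cur := pvSetKey cur "description"
          (PySem.Str.strip (pvReadKey cur "description" ++ "\n" ++ desc_text))
        let cur := if (pvColOf mapping "quantity").isSome ∧ pvCell mapping row "quantity" ≠ "" then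
            pvSetKey cur "quantity"
              (if pvCell mapping row "quantity" ≠ "" then pvCell mapping row "quantity"
               else pvReadKey cur "quantity") else cur
        let cur := if (pvColOf mapping "unit_value").isSome ∧ pvCell mapping row "unit_value" ≠ "" then
            pvSetKey cur "unit_value"
              (if pvCell mapping row "unit_value" ≠ "" then pvCell mapping row "unit_value"
               else pvReadKey cur "unit_value") else cur
        let cur := if (pvColOf mapping "total_value").isSome ∧ pvCell mapping row "total_value" ≠ "" then
            pvSetKey cur "total_value"
              (if pvCell mapping row "total_value" ≠ "" then pvCell mapping row "total_value"
               else pvReadKey cur "total_value") else cur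
        cur), true)
    else st

def extract_table_items (table : List (List String)) (header_idx : Int) (mapping : List (String × Int)) : List (List (String × String)) :=
  ((PySem.List.slice table (some (header_idx + 1)) none).foldl (pvStepA mapping) ([], false)).1

-- ===== PORT B =====
-- phase 1 inner loop: collect continuation rows until an empty row or the next item row
def pvTakeConts (mapping : List (String × Int)) :
    List (List String) → List (List String) × List (List String)
  | [] => ([], [])
  | r :: rs =>
    if ¬ pvTruthy r ∨ pvCell mapping r "item" ≠ "" then ([], r :: rs)
    else
      (if pvCell mapping r "description" ≠ "" then r :: (pvTakeConts mapping rs).1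
       else (pvTakeConts mapping rs).1, (pvTakeConts mapping rs).2)

theorem pvTakeConts_snd_length_le (mapping : List (String × Int)) (rs : List (List String)) :
    (pvTakeConts mapping rs).2.length ≤ rs.length := by
  induction rs with
  | nil => simp [pvTakeConts]
  | cons r rs ih =>
    simp only [pvTakeConts]
    split
    · simp
    · simpa using Nat.le_succ_of_le ih

-- phase 1 outer loop: partition into blocks (head item row, continuation rows)
def pvBlocks (mapping : List (String × Int)) :
    List (List String) → List (List String × List (List String))
  | [] => []
  | r :: rs =>
    if pvTruthy r ∧ pvCell mapping r "item" ≠ "" then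
      (r, (pvTakeConts mapping rs).1) :: pvBlocks mapping (pvTakeConts mapping rs).2
    else pvBlocks mapping rs
termination_by rs => rs.length
decreasing_by
  · exact Nat.lt_succ_of_le (pvTakeConts_snd_length_le mapping rs)
  · exact Nat.lt_succ_of_le (Nat.le_refl _)

-- phase 2: fold one continuation row into the item being built
def pvExtend (mapping : List (String × Int)) (item : List (String × String)) (row : List String) :
    List (String × String) :=
  let item := pvSetKey item "description"
    (PySem.Str.strip (pvReadKey item "description" ++ "\n" ++ pvCell mapping row "description"))
  ["quantity", "unit_value", "total_value"].foldl
    (fun it k => let v := pvCell mapping row k; if v ≠ "" then pvSetKey it k v else it) item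

-- phase 2: build one item dict from a block
def pvBuild (mapping : List (String × Int)) (block : List String × List (List String)) :
    List (String × String) :=
  (block.2).foldl (pvExtend mapping)
    [("item", pvCell mapping block.1 "item"),
     ("description", pvCell mapping block.1 "description"),
     ("quantity", pvCell mapping block.1 "quantity"),
     ("unit_value", pvCell mapping block.1 "unit_value"),
     ("total_value", pvCell mapping block.1 "total_value")]

def extract_table_items_alt (table : List (List String)) (header_idx : Int) (mapping : List (String × Int)) : List (List (String × String)) :=
  let rows := (PySem.List.slice table (some (header_idx + 1)) none).map pvNorm
  (pvBlocks mapping rows).map (pvBuild mapping)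

-- ===== PRECONDITION & SPEC =====
-- Pre_ excludes inputs where a mapped column index is below -len(row) for some non-blank row after
-- the header: there Python's negative-index access raises IndexError (the exclusion is slightly
-- wider than the exact raise set, since quantity/unit/total lookups are reached only once an item
-- row has opened a block — see the cite in claim.json, where A still returns []).
def Pre_extract_table_items (table : List (List String)) (header_idx : Int) (mapping : List (String × Int)) : Prop :=
  ∀ r ∈ PySem.List.slice table (some (header_idx + 1)) none,
    pvTruthy (pvNorm r) = true →
    ∀ k ∈ ["item", "description", "quantity", "unit_value", "total_value"],
      ∀ col, pvColOf mapping k = some col → -(r.length : Int) ≤ col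
instance (table : List (List String)) (header_idx : Int) (mapping : List (String × Int)) : Decidable (Pre_extract_table_items table header_idx mapping) := by unfold Pre_extract_table_items; infer_instance

def pvWitness_extract_table_items : List (List String) × Int × (List (String × Int)) :=
  ([["code", "desc", "qty"], ["A1", "widget ", "2"], ["", " more", ""], []],
   0,
   [("item", 0), ("description", 1), ("quantity", 2)])

def Spec_extract_table_items (table : List (List String)) (header_idx : Int) (mapping : List (String × Int)) (out : List (List (String × String))) : Prop := out = extract_table_items_alt table header_idx mapping
instance (table : List (List String)) (header_idx : Int) (mapping : List (String × Int)) (out : List (List (String × String))) : Decidable (Spec_extract_table_items table header_idx mapping out) := by unfold Spec_extract_table_items; infer_instance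

-- ===== CLAIM (what is proved, stated in full; the proofs are below) =====
def Claim_equal_extract_table_items : Prop := ∀ (table : List (List String)) (header_idx : Int) (mapping : List (String × Int)), Dom_extract_table_items table header_idx mapping → Pre_extract_table_items table header_idx mapping → Spec_extract_table_items table header_idx mapping (extract_table_items table header_idx mapping)

-- ===== LEMMAS AND PROOFS =====

theorem pvUpdLast_append_singleton (xs : List (List (String × String)))
    (p : List (String × String)) (f : List (String × String) → List (String × String)) :
    pvUpdLast (xs ++ [p]) f = xs ++ [f p] := by
  induction xs with
  | nil => rfl
  | cons x xs ih =>
    cases xs with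
    | nil => rfl
    | cons y ys => simpa [pvUpdLast] using ih

-- a non-empty cell value implies the row has a truthy cell
theorem pvCell_ne_empty_truthy (mapping : List (String × Int)) (row : List String) (k : String)
    (h : pvCell mapping row k ≠ "") : pvTruthy row = true := by
  rcases hcol : pvColOf mapping k with _ | col
  · exact absurd (by simp [pvCell, hcol]) h
  · by_cases hlt : col < (row.length : Int)
    · by_cases hin : PySem.Raise.InRange row.length col
      · have hm := PySem.List.pyGetD_mem row (i := col) "" hin
        have hv : pvCell mapping row k = PySem.List.pyGetD row col "" := by
          simp [pvCell, hcol, hlt]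
        exact List.any_eq_true.2 ⟨_, hm, by rw [← hv]; simpa using h⟩
      · exact absurd (by simp [pvCell, hcol, hlt,
          PySem.List.pyGetD_of_none row col "" ((PySem.List.pyGet?_eq_none_iff row col).mpr hin)]) h
    · exact absurd (by simp [pvCell, hcol, hlt]) h

theorem pvColOf_isSome_of_cell_ne (mapping : List (String × Int)) (row : List String) (k : String)
    (h : pvCell mapping row k ≠ "") : (pvColOf mapping k).isSome := by
  rcases hcol : pvColOf mapping k with _ | col
  · exact absurd (by simp [pvCell, hcol]) h
  · rfl

-- step lemma: an all-blank row resets the state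
theorem pvStepA_blank (mapping : List (String × Int)) (st : List (List (String × String)) × Bool)
    (raw : List String) (hE : pvTruthy (pvNorm raw) = false) :
    pvStepA mapping st raw = (st.1, false) := by
  simp [pvStepA, hE]

-- step lemma: an item row appends a fresh item (the any() guard holds: its "item" value is truthy)
theorem pvStepA_item (mapping : List (String × Int)) (st : List (List (String × String)) × Bool)
    (raw : List String) (hI : pvCell mapping (pvNorm raw) "item" ≠ "") :
    pvStepA mapping st raw =
      (st.1 ++ [[("item", pvCell mapping (pvNorm raw) "item"),
                 ("description", pvCell mapping (pvNorm raw) "description"),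
                 ("quantity", pvCell mapping (pvNorm raw) "quantity"),
                 ("unit_value", pvCell mapping (pvNorm raw) "unit_value"),
                 ("total_value", pvCell mapping (pvNorm raw) "total_value")]], true) := by
  have hE := pvCell_ne_empty_truthy mapping (pvNorm raw) "item" hI
  simp [pvStepA, hE, hI]

-- step lemma: a truthy non-item row without description leaves the state unchanged
theorem pvStepA_skip (mapping : List (String × Int)) (st : List (List (String × String)) × Bool)
    (raw : List String) (hE : pvTruthy (pvNorm raw) = true)
    (hI : pvCell mapping (pvNorm raw) "item" = "")
    (hD : pvCell mapping (pvNorm raw) "description" = "") :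
    pvStepA mapping st raw = st := by
  simp [pvStepA, hE, hI, hD]

-- step lemma: a continuation row on a closed state does nothing
theorem pvStepA_cont_closed (mapping : List (String × Int)) (items : List (List (String × String)))
    (raw : List String) (hE : pvTruthy (pvNorm raw) = true)
    (hI : pvCell mapping (pvNorm raw) "item" = "") :
    pvStepA mapping (items, false) raw = (items, false) := by
  simp [pvStepA, hE, hI]

-- step lemma: a continuation row on an open state extends the last item exactly as pvExtend does
theorem pvStepA_cont_open (mapping : List (String × Int)) (items : List (List (String × String)))
    (p : List (String × String)) (raw : List String) (hE : pvTruthy (pvNorm raw) = true)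
    (hI : pvCell mapping (pvNorm raw) "item" = "")
    (hD : pvCell mapping (pvNorm raw) "description" ≠ "") :
    pvStepA mapping (items ++ [p], true) raw = (items ++ [pvExtend mapping p (pvNorm raw)], true) := by
  simp only [pvStepA]
  rw [if_neg (by simp [hE]), if_neg (by simp [hI]), if_pos (by exact ⟨trivial, hD⟩)]
  rw [pvUpdLast_append_singleton]
  refine congrArg (fun x => (items ++ [x], true)) ?_
  simp only [pvExtend, List.foldl_cons, List.foldl_nil]
  have guard_eq : ∀ k, ((pvColOf mapping k).isSome ∧ pvCell mapping (pvNorm raw) k ≠ "")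
      ↔ pvCell mapping (pvNorm raw) k ≠ "" :=
    fun k => ⟨fun h => h.2, fun h => ⟨pvColOf_isSome_of_cell_ne mapping (pvNorm raw) k h, h⟩⟩
  simp only [guard_eq]
  by_cases hq : pvCell mapping (pvNorm raw) "quantity" = "" <;>
    by_cases hu : pvCell mapping (pvNorm raw) "unit_value" = "" <;>
      by_cases ht : pvCell mapping (pvNorm raw) "total_value" = "" <;>
        simp [hq, hu, ht]

-- the combined invariant: running A's loop from a closed state produces B's blocks;
-- from an open state the pending last item absorbs exactly B's continuation rows
theorem pvMain (mapping : List (String × Int)) (ls : List (List String)) :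
    (∀ items, (ls.foldl (pvStepA mapping) (items, false)).1
        = items ++ (pvBlocks mapping (ls.map pvNorm)).map (pvBuild mapping))
    ∧ (∀ items p, (ls.foldl (pvStepA mapping) (items ++ [p], true)).1
        = items ++ [((pvTakeConts mapping (ls.map pvNorm)).1).foldl (pvExtend mapping) p]
          ++ (pvBlocks mapping ((pvTakeConts mapping (ls.map pvNorm)).2)).map (pvBuild mapping)) := by
  induction ls with
  | nil => exact ⟨fun items => by simp [pvBlocks], fun items p => by simp [pvTakeConts, pvBlocks]⟩
  | cons raw ls ih =>
    obtain ⟨ih1, ih2⟩ := ih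
    by_cases hE : pvTruthy (pvNorm raw) = true
    · by_cases hI : pvCell mapping (pvNorm raw) "item" = ""
      · by_cases hD : pvCell mapping (pvNorm raw) "description" = ""
        · -- truthy row with neither item nor description: A leaves the state alone, B skips it
          constructor
          · intro items
            rw [List.foldl_cons, pvStepA_skip mapping _ raw hE hI hD, ih1 items]
            rw [List.map_cons, pvBlocks, if_neg (by simp [hI])]
          · intro items p
            rw [List.foldl_cons, pvStepA_skip mapping _ raw hE hI hD, ih2 items p]
            rw [List.map_cons, pvTakeConts, if_neg (by simp [hE, hI]), if_neg (by simp [hD])]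
        · -- continuation row (only acts on an open block)
          constructor
          · intro items
            rw [List.foldl_cons, pvStepA_cont_closed mapping items raw hE hI, ih1 items]
            rw [List.map_cons, pvBlocks, if_neg (by simp [hI])]
          · intro items p
            rw [List.foldl_cons, pvStepA_cont_open mapping items p raw hE hI hD,
              ih2 items (pvExtend mapping p (pvNorm raw))]
            rw [List.map_cons, pvTakeConts, if_neg (by simp [hE, hI]), if_pos hD]
            simp
      · -- item row: starts a new block
        constructor
        · intro items
          rw [List.foldl_cons, pvStepA_item mapping _ raw hI, ih2 items _]
          rw [List.map_cons, pvBlocks, if_pos ⟨hE, hI⟩, List.map_cons, pvBuild]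
          simp
        · intro items p
          rw [List.foldl_cons, pvStepA_item mapping _ raw hI, ih2 (items ++ [p]) _]
          rw [List.map_cons, pvTakeConts, if_pos (Or.inr hI)]
          rw [pvBlocks, if_pos ⟨hE, hI⟩, List.map_cons, pvBuild]
          simp
    · -- all-blank row: closes the block
      have hE' : pvTruthy (pvNorm raw) = false := by simpa using hE
      have hI : pvCell mapping (pvNorm raw) "item" = "" := by
        by_contra h
        rw [pvCell_ne_empty_truthy mapping (pvNorm raw) "item" h] at hE'
        simp at hE'
      constructor
      · intro items
        rw [List.foldl_cons, pvStepA_blank mapping _ raw hE', ih1 items]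
        rw [List.map_cons, pvBlocks, if_neg (by simp [hE'])]
      · intro items p
        rw [List.foldl_cons, pvStepA_blank mapping _ raw hE', ih1 (items ++ [p])]
        rw [List.map_cons, pvTakeConts, if_pos (Or.inl (by simp [hE']))]
        rw [pvBlocks, if_neg (by simp [hE'])]
        simp

-- ===== VERDICT (by name: the statement is the Claim_ definition above) =====
theorem extract_table_items_spec : Claim_equal_extract_table_items := by
  intro table header_idx mapping _hDom _hPre
  unfold Spec_extract_table_items extract_table_items extract_table_items_alt
  have h := (pvMain mapping (PySem.List.slice table (some (header_idx + 1)) none)).1 []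
  simpa using h
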